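-- pv_equiv track=rewrite | github.com/vincent-kk/Basic-Algorithm | programmers/lv2/60058.py | solution
-- ===== SOURCE A (Python) =====
-- def solution(p: str) -> str:
--     def check(s: str) -> bool:
--         stack = []
--         for c in s:
--             if c == "(":
--                 stack.append(c)
--                 continue
--             if c == ")":
--                 if stack and stack[-1] == "(":
--                     stack.pop()
--                 else:
--                     return False
--         return True
--
--     def do(s: str) -> str:
--         if not s:
--             return ""
--         l, r = 0, 0
--         i = 1
--         for j, c in enumerate(s):
--             if c == "(":
--                 l += 1
--             elif c == ")":
--                 r += 1
--             if l == r: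
--                 i = j + 1
--                 break
--         u = s[:i]
--         v = s[i:]
--
--         if check(u):
--             return u + do(v)
--         else:
--             return (
--                 "(" + do(v) + ")" + "".join(["(" if c == ")" else ")" for c in u[1:-1]])
--             )
--
--     return do(p)
-- ===== SOURCE B (Python) =====
-- def solution(p: str) -> str:
--     n = len(p)
--     pre = []
--     posts = []
--     i = 0
--     while i < n:
--         bal = 0
--         j = i
--         while j < n:
--             if p[j] == '(':
--                 bal += 1
--             elif p[j] == ')':
--                 bal -= 1
--             j += 1
--             if bal == 0:
--                 break
--         if bal != 0:
--             j = i + 1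
--         if p[i] != ')':
--             pre.append(p[i:j])
--         else:
--             pre.append('(')
--             posts.append(')' + ''.join(')' if c != ')' else '(' for c in p[i + 1:j - 1]))
--         i = j
--     return ''.join(pre) + ''.join(reversed(posts))
-- ===== Notes on version B (the rewrite author's own statement) =====
-- stated objective: faster
-- what changed: Replaced A's string-slicing recursion with per-level stack-based check() re-scan by a single left-to-right pass that splits on a running balance counter, decides each segment's correctness by its first character alone, and assembles the result with prefix/postfix accumulators.
import Mathlib
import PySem

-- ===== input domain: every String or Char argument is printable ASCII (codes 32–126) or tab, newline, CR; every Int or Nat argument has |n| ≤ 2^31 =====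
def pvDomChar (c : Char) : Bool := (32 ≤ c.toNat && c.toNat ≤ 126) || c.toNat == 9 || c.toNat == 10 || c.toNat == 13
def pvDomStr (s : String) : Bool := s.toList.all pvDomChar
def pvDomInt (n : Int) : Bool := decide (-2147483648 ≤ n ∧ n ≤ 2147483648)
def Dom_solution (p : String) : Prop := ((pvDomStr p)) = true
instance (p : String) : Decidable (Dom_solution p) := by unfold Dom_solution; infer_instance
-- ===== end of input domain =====

-- B is a single left-to-right pass with prefix/postfix accumulators (no re-scan `check`,
-- no per-level suffix slicing): objective = faster (asymptotic).

-- ===== PORT A =====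
-- A's `check`: stack of '(' chars, top at the head
def checkGo : List Char → List Char → Bool
  | _, [] => true
  | stack, c :: cs =>
    if c = '(' then checkGo ('(' :: stack) cs
    else if c = ')' then
      match stack with
      | '(' :: rest => checkGo rest cs
      | _ => false
    else checkGo stack cs

-- A's `for j, c in enumerate(s)` loop computing i (default 1)
def goA : List Char → Nat → Int → Int → Nat
  | [], _, _, _ => 1
  | c :: cs, j, l, r =>
    let l' := if c = '(' then l + 1 else l
    let r' := if c = ')' then r + 1 else r
    if l' = r' then j + 1 else goA cs (j + 1) l' r'

theorem goA_pos : ∀ (cs : List Char) (j : Nat) (l r : Int), 1 ≤ goA cs j l r := by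
  intro cs
  induction cs with
  | nil => intro j l r; simp [goA]
  | cons c cs ih =>
    intro j l r
    simp only [goA]
    split_ifs <;> first | omega | exact ih _ _ _

def flipA (c : Char) : Char := if c = ')' then '(' else ')'

def doA : List Char → List Char
  | [] => []
  | c :: cs =>
    let i := goA (c :: cs) 0 0 0
    let u := (c :: cs).take i
    let v := (c :: cs).drop i
    if checkGo [] u then u ++ doA v
    else '(' :: (doA v ++ ')' :: ((u.drop 1).dropLast.map flipA))
termination_by s => s.length
decreasing_by
  all_goals
    have h := goA_pos (c :: cs) 0 0 0
    simp [List.length_drop]; omega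

def solution (p : String) : String := String.ofList (doA p.toList)

-- ===== PORT B =====
-- B's inner `while` loop: number of chars consumed until the balance first hits 0 (none if never)
def scanB : List Char → Int → Option Nat
  | [], _ => none
  | c :: cs, bal =>
    let b := bal + (if c = '(' then 1 else 0) - (if c = ')' then 1 else 0)
    if b = 0 then some 1 else (scanB cs b).map (· + 1)

theorem scanB_pos : ∀ (cs : List Char) (b : Int) (k : Nat), scanB cs b = some k → 1 ≤ k := by
  intro cs
  induction cs with
  | nil => intro b k h; simp [scanB] at h
  | cons c cs ih =>
    intro b k h
    simp only [scanB] at h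
    split_ifs at h <;>
      first
      | (injection h with h; omega)
      | (simp only [Option.map_eq_some_iff] at h; obtain ⟨k', _, hk⟩ := h; omega)

def flipB (c : Char) : Char := if c ≠ ')' then ')' else '('

-- B's outer `while` loop; `posts` is kept newest-first (Python appends then joins reversed)
def loopB : List Char → List Char → List Char → List Char
  | [], pre, posts => pre ++ posts
  | c :: cs, pre, posts =>
    let k := (scanB (c :: cs) 0).getD 1
    let u := (c :: cs).take k
    if c ≠ ')' then loopB ((c :: cs).drop k) (pre ++ u) posts
    else loopB ((c :: cs).drop k) (pre ++ ['(']) ((')' :: (u.drop 1).dropLast.map flipB) ++ posts)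
termination_by s => s.length
decreasing_by
  all_goals
    have h1 : 1 ≤ (scanB (c :: cs) 0).getD 1 := by
      cases hs : scanB (c :: cs) 0 with
      | none => simp
      | some k => simpa using scanB_pos _ _ _ hs
    simp [List.length_drop]; omega

def solution_alt (p : String) : String := String.ofList (loopB p.toList [] [])

-- ===== PRECONDITION & SPEC =====
def Spec_solution (p : String) (out : String) : Prop := out = solution_alt p
instance (p : String) (out : String) : Decidable (Spec_solution p out) := by unfold Spec_solution; infer_instance

-- ===== CLAIM (what is proved, stated in full; the proofs are below) =====
def Claim_equal_solution : Prop := ∀ (p : String), Dom_solution p → Spec_solution p (solution p)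

-- ===== LEMMAS AND PROOFS =====

theorem flipA_eq_flipB : flipA = flipB := by
  funext c; simp only [flipA, flipB]; split_ifs <;> simp_all

-- A's index scan agrees with B's balance scan
theorem goA_eq_scanB : ∀ (cs : List Char) (j : Nat) (l r : Int),
    goA cs j l r = (match scanB cs (l - r) with | some k => j + k | none => 1) := by
  intro cs
  induction cs with
  | nil => intro j l r; simp [goA, scanB]
  | cons c cs ih =>
    intro j l r
    simp only [goA, scanB]
    have hb : l - r + (if c = '(' then (1:Int) else 0) - (if c = ')' then 1 else 0)
        = (if c = '(' then l + 1 else l) - (if c = ')' then r + 1 else r) := by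
      split_ifs <;> ring
    rw [hb]
    by_cases h0 : (if c = '(' then l + 1 else l) = (if c = ')' then r + 1 else r)
    · rw [if_pos h0, if_pos (sub_eq_zero.mpr h0)]
    · rw [if_neg h0, if_neg (fun hh => h0 (sub_eq_zero.mp hh)), ih]
      cases scanB cs ((if c = '(' then l + 1 else l) - (if c = ')' then r + 1 else r)) with
      | none => rfl
      | some k => show j + 1 + k = j + (k + 1); omega

-- minimal balanced segments starting at positive depth never underflow `check`'s stack
theorem checkGo_rep : ∀ (cs : List Char) (m : Nat) (k : Nat),
    scanB cs ((m : Int) + 1) = some k →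
    checkGo (List.replicate (m + 1) '(') (cs.take k) = true := by
  intro cs
  induction cs with
  | nil => intro m k h; simp [scanB] at h
  | cons c cs ih =>
    intro m k h
    by_cases hp : c = '('
    · subst hp
      simp only [scanB, Char.reduceEq, reduceIte] at h
      rw [if_neg (by omega)] at h
      simp only [Option.map_eq_some_iff] at h
      obtain ⟨k', hk', rfl⟩ := h
      have hk2 : scanB cs ((↑(m + 1) : Int) + 1) = some k' := by
        convert hk' using 2
      have := ih (m + 1) k' hk2
      simpa [List.take_succ_cons, checkGo, List.replicate_succ] using this
    · by_cases hq : c = ')'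
      · subst hq
        simp only [scanB, Char.reduceEq, reduceIte] at h
        by_cases hm : m = 0
        · subst hm
          rw [if_pos (by norm_num)] at h
          injection h with h1
          rw [← h1]
          simp [checkGo, List.replicate]
        · rw [if_neg (by omega)] at h
          simp only [Option.map_eq_some_iff] at h
          obtain ⟨k', hk', rfl⟩ := h
          obtain ⟨m', rfl⟩ : ∃ m', m = m' + 1 := ⟨m - 1, by omega⟩
          have hk2 : scanB cs ((↑m' : Int) + 1) = some k' := by
            convert hk' using 2
            push_cast; ring
          have := ih m' k' hk2
          simpa [List.take_succ_cons, checkGo, List.replicate_succ] using this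
      · simp only [scanB, if_neg hp, if_neg hq] at h
        rw [if_neg (by omega)] at h
        simp only [Option.map_eq_some_iff] at h
        obtain ⟨k', hk', rfl⟩ := h
        have hk2 : scanB cs ((↑m : Int) + 1) = some k' := by
          convert hk' using 2
        have := ih m k' hk2
        simpa [List.take_succ_cons, checkGo, List.replicate_succ, hp, hq] using this

-- the `check` test on the split prefix is exactly "first char is not ')'"
theorem checkGo_take : ∀ (c : Char) (cs : List Char),
    checkGo [] ((c :: cs).take ((scanB (c :: cs) 0).getD 1)) = (c ≠ ')' : Bool) := by
  intro c cs
  by_cases hq : c = ')'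
  · subst hq
    have h1 : 1 ≤ (scanB (')' :: cs) 0).getD 1 := by
      cases hs : scanB (')' :: cs) 0 with
      | none => simp
      | some k => simpa using scanB_pos _ _ _ hs
    obtain ⟨k', hk⟩ : ∃ k', (scanB (')' :: cs) 0).getD 1 = k' + 1 :=
      ⟨(scanB (')' :: cs) 0).getD 1 - 1, by omega⟩
    simp [hk, List.take_succ_cons, checkGo]
  · by_cases hp : c = '('
    · subst hp
      cases hs : scanB ('(' :: cs) 0 with
      | none => simp [List.take_succ_cons, checkGo]
      | some k =>
        simp only [scanB, Char.reduceEq, reduceIte] at hs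
        rw [if_neg (by norm_num)] at hs
        simp only [Option.map_eq_some_iff] at hs
        obtain ⟨k', hk', rfl⟩ := hs
        have hk2 : scanB cs ((↑(0 : Nat) : Int) + 1) = some k' := by
          convert hk' using 2
        have := checkGo_rep cs 0 k' hk2
        simp only [Option.getD_some, List.take_succ_cons]
        simp only [checkGo]
        simpa [List.replicate] using this
    · have hs : scanB (c :: cs) 0 = some 1 := by
        simp [scanB, hp, hq]
      simp [hs, List.take_succ_cons, checkGo, hp, hq]

-- main invariant: B's accumulator loop computes A's recursion sandwiched between the accumulators
theorem loopB_eq_doA : ∀ (n : Nat) (s pre posts : List Char), s.length ≤ n →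
    loopB s pre posts = pre ++ doA s ++ posts := by
  intro n
  induction n with
  | zero =>
    intro s pre posts h
    have : s = [] := by cases s <;> simp_all
    subst this; simp [loopB, doA]
  | succ n ih =>
    intro s pre posts h
    cases s with
    | nil => simp [loopB, doA]
    | cons c cs =>
      rw [loopB, doA]
      have hik : goA (c :: cs) 0 0 0 = (scanB (c :: cs) 0).getD 1 := by
        rw [goA_eq_scanB]
        norm_num
        cases scanB (c :: cs) 0 <;> simp
      have h1 : 1 ≤ (scanB (c :: cs) 0).getD 1 := by
        cases hs : scanB (c :: cs) 0 with
        | none => simp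
        | some k => simpa using scanB_pos _ _ _ hs
      have hlen : ((c :: cs).drop ((scanB (c :: cs) 0).getD 1)).length ≤ n := by
        simp only [List.length_drop, List.length_cons] at *
        omega
      simp only [hik, checkGo_take]
      by_cases hq : c = ')'
      · subst hq
        rw [if_neg (by simp), if_neg (by simp)]
        rw [ih _ _ _ hlen, flipA_eq_flipB]
        simp [List.append_assoc]
      · rw [if_pos (by simp [hq]), if_pos (by simp [hq]), ih _ _ _ hlen]
        simp [List.append_assoc]

-- ===== VERDICT (by name: the statement is the Claim_ definition above) =====
theorem solution_spec : Claim_equal_solution := by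
  intro p _
  unfold Spec_solution solution solution_alt
  rw [loopB_eq_doA p.toList.length _ _ _ le_rfl]
  simp
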